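-- pv_equiv track=rewrite | github.com/domrab/Bifrost_BSL | BSL/_overlord.py | _to_vec4
-- ===== SOURCE A (Python) =====
-- def _to_vec4(x):
--     arr = x.count(">")
--     for _ in range(arr):
--         x = x[6:-1]
--
--     if "::" not in x:
--         return arr * "array<" + f"Math::{x}4" + arr * ">"
--
--     if x[-3] in "234" and x[-1] in "234" and x[-2] == "x":
--         x = x[:-3]
--     elif x[-1] in "234":
--         x = x[:-1]
--
--     return arr * "array<" + f"{x}4" + arr * ">"
-- ===== SOURCE B (Python) =====
-- _MAT = {a + "x" + b for a in "234" for b in "234"}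
--
-- def _peel(x, depth):
--     if depth > 0:
--         return "array<" + _peel(x[6:-1], depth - 1) + ">"
--     if "::" not in x:
--         return "Math::" + x + "4"
--     k = 3 if x[-3:] in _MAT else 1 if x[-1:] in "234" else 0
--     return x[: len(x) - k] + "4"
--
-- def _to_vec4(x):
--     return _peel(x, x.count(">"))
-- ===== Notes on version B (the rewrite author's own statement) =====
-- stated objective: alternative
-- what changed: B is a pure recursion on the wrapper depth that builds the wrapped result on the way back out ('array<' + inner + '>'), with a base case that decides one strip length k via a tail-slice set lookup, instead of A's destructive peel loop followed by negative-index character tests and arr*-string-multiplication reassembly.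
-- outside the precondition, e.g. on _to_vec4('::'): A raises IndexError, B returns '::4'
import Mathlib
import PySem

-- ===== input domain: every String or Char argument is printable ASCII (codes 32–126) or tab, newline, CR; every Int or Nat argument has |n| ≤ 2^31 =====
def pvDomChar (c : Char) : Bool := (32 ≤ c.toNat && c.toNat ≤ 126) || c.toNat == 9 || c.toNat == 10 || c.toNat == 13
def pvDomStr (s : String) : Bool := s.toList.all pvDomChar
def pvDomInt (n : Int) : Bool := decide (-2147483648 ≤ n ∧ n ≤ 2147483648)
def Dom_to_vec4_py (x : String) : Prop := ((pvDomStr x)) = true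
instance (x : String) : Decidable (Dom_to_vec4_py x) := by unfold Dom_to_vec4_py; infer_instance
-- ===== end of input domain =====

-- B rebuilds the function as a recursion on the wrapper depth (wrap on the way back out)
-- with a tail-slice set lookup in the base case; objective: alternative decomposition.

-- ===== PORT A =====
def to_vec4_chars (x : List Char) : List Char :=
  let arr := PySem.Chars.count x ['>']
  let x1 := (PySem.List.pyRange 0 (arr : Int) 1).foldl
      (fun s _ => PySem.List.slice s (some 6) (some (-1))) x
  if PySem.Chars.isIn [':', ':'] x1 = false then
    PySem.List.pyRepeat "array<".toList (arr : Int) ++ ("Math::".toList ++ x1 ++ ['4'])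
      ++ PySem.List.pyRepeat ['>'] (arr : Int)
  else
    match PySem.List.pyGet? x1 (-3) with
    | none => []   -- Python raises IndexError on x[-3] here: excluded by Pre_to_vec4_py
    | some c3 =>
      let c1 := (PySem.List.pyGet? x1 (-1)).getD ' '   -- always `some` once x[-3] is in range
      let c2 := (PySem.List.pyGet? x1 (-2)).getD ' '
      let x2 :=
        if PySem.Chars.isIn [c3] ['2', '3', '4'] && PySem.Chars.isIn [c1] ['2', '3', '4']
            && (c2 == 'x') then
          PySem.List.slice x1 none (some (-3))
        else if PySem.Chars.isIn [c1] ['2', '3', '4'] then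
          PySem.List.slice x1 none (some (-1))
        else x1
      PySem.List.pyRepeat "array<".toList (arr : Int) ++ (x2 ++ ['4'])
        ++ PySem.List.pyRepeat ['>'] (arr : Int)

def to_vec4_py (x : String) : String := String.ofList (to_vec4_chars x.toList)

-- ===== PORT B =====
-- Source B's _MAT (a set of nine literal strings)
def pvMAT : List (List Char) :=
  [['2','x','2'], ['2','x','3'], ['2','x','4'],
   ['3','x','2'], ['3','x','3'], ['3','x','4'],
   ['4','x','2'], ['4','x','3'], ['4','x','4']]

-- Source B's _peel: recursion on the depth, wrapping the recursive result on the way out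
def pvPeel : List Char → Nat → List Char
  | x, d + 1 =>
      "array<".toList ++ pvPeel (PySem.List.slice x (some 6) (some (-1))) d ++ ['>']
  | x, 0 =>
      if PySem.Chars.isIn [':', ':'] x = false then
        "Math::".toList ++ x ++ ['4']
      else
        let k : Int :=
          if pvMAT.contains (PySem.List.slice x (some (-3)) none) then 3
          else if PySem.Chars.isIn (PySem.List.slice x (some (-1)) none) ['2', '3', '4'] then 1
          else 0
        PySem.List.slice x none (some ((x.length : Int) - k)) ++ ['4']

def to_vec4_py_alt (x : String) : String :=
  String.ofList (pvPeel x.toList (PySem.Chars.count x.toList ['>']))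

-- ===== PRECONDITION & SPEC =====
-- the fully stripped core x[6*arr : len(x)-arr] that A's peel loop produces
def pvCore (x : List Char) : List Char :=
  PySem.List.slice x (some (6 * (PySem.Chars.count x ['>'] : Int)))
    (some ((x.length : Int) - (PySem.Chars.count x ['>'] : Int)))

-- Pre_ excludes exactly the inputs on which A raises IndexError: those whose fully
-- stripped core is the two-character string "::", where A evaluates x[-3].
def Pre_to_vec4_py (x : String) : Prop := pvCore x.toList ≠ [':', ':']
instance (x : String) : Decidable (Pre_to_vec4_py x) := by unfold Pre_to_vec4_py; infer_instance

def pvWitness_to_vec4_py : String := "array<float3>"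

def Spec_to_vec4_py (x : String) (out : String) : Prop := out = to_vec4_py_alt x
instance (x : String) (out : String) : Decidable (Spec_to_vec4_py x out) := by unfold Spec_to_vec4_py; infer_instance

-- ===== CLAIM (what is proved, stated in full; the proofs are below) =====
def Claim_equal_to_vec4_py : Prop := ∀ (x : String), Dom_to_vec4_py x → Pre_to_vec4_py x → Spec_to_vec4_py x (to_vec4_py x)

-- ===== LEMMAS AND PROOFS =====

-- A's peel loop, as structural recursion on the depth (proof helper)
def pvIter : List Char → Nat → List Char
  | x, 0 => x
  | x, d + 1 => pvIter (PySem.List.slice x (some 6) (some (-1))) d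

lemma pv_count_go_le (sub : List Char) (hsub : sub ≠ []) :
    ∀ fuel l acc, PySem.Chars.count.go sub fuel l acc ≤ acc + l.length := by
  intro fuel
  induction fuel with
  | zero => intro l acc; rw [PySem.Chars.count.go]; simp
  | succ k ih =>
    intro l acc
    cases l with
    | nil => rw [PySem.Chars.count.go]; simp; omega
    | cons h t =>
      rw [PySem.Chars.count.go]
      split
      · have h2 := ih (List.drop sub.length (h :: t)) (acc + 1)
        have h3 : 1 ≤ sub.length := by cases sub <;> simp_all
        simp only [List.length_drop, List.length_cons] at h2 ⊢
        omega
      · have h2 := ih t acc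
        simp only [List.length_cons]
        omega

lemma pv_count_le (x : List Char) : PySem.Chars.count x ['>'] ≤ x.length := by
  have := pv_count_go_le ['>'] (by simp) x.length x 0
  simpa [PySem.Chars.count] using this

lemma pv_slice_6_neg1 (s : List Char) :
    PySem.List.slice s (some 6) (some (-1)) = (s.drop 6).take (s.length - 7) := by
  simp only [PySem.List.slice, PySem.List.clampIdx]
  split_ifs with h1 h2 h3
  all_goals try omega
  · have hs : s = [] := by cases s <;> simp_all <;> omega
    subst hs; simp
  · rcases Nat.lt_or_ge s.length 6 with h | h
    · rw [List.drop_eq_nil_of_le (i := min (Int.toNat 6) s.length) (by omega),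
        List.drop_eq_nil_of_le (i := 6) (by omega)]
      simp
    · rw [show min (Int.toNat 6) s.length = 6 from by omega]
      congr 1
      omega

lemma pv_iter_formula (x : List Char) (n : Nat) :
    pvIter x n = (x.drop (6 * n)).take (x.length - 7 * n) := by
  induction n generalizing x with
  | zero => simp [pvIter]
  | succ k ih =>
    rw [pvIter, ih, pv_slice_6_neg1]
    rw [List.drop_take, List.drop_drop, List.take_take, List.length_take, List.length_drop]
    congr 1
    · omega
    · congr 1
      omega

lemma pv_loop_eq_iter (x : List Char) (n : Nat) :
    (List.range n).foldl (fun s _ => PySem.List.slice s (some 6) (some (-1))) x = pvIter x n := by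
  induction n generalizing x with
  | zero => simp [pvIter]
  | succ k ih =>
    rw [List.range_succ_eq_map]
    simp only [List.foldl_cons, List.foldl_map]
    rw [pvIter, ← ih]

lemma pv_slice_formula (x : List Char) (a : Nat) (h : a ≤ x.length) :
    PySem.List.slice x (some (6 * (a : Int))) (some ((x.length : Int) - (a : Int)))
      = (x.drop (6 * a)).take (x.length - 7 * a) := by
  simp only [PySem.List.slice, PySem.List.clampIdx]
  split_ifs with h1 h2 h3 h4
  all_goals try omega
  rcases Nat.lt_or_ge x.length (6 * a) with hl | hl
  · rw [List.drop_eq_nil_of_le (i := min (Int.toNat (6 * (a:Int))) x.length) (by omega),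
      List.drop_eq_nil_of_le (i := 6 * a) (by omega)]
    simp
  · rw [show min (Int.toNat (6 * (a:Int))) x.length = 6 * a from by omega]
    congr 1
    omega

lemma pv_core_eq (x : List Char) :
    pvCore x = (x.drop (6 * PySem.Chars.count x ['>'])).take
      (x.length - 7 * PySem.Chars.count x ['>']) := by
  unfold pvCore
  exact pv_slice_formula x _ (pv_count_le x)

lemma pv_iter_eq_core (x : List Char) :
    pvIter x (PySem.Chars.count x ['>']) = pvCore x := by
  rw [pv_iter_formula, pv_core_eq]

lemma pv_repeat_succ (l : List Char) (d : Nat) :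
    PySem.List.pyRepeat l ((d : Int) + 1) = l ++ PySem.List.pyRepeat l (d : Int) := by
  simp [PySem.List.pyRepeat, show ((d : Int) + 1).toNat = d + 1 from by omega,
    List.replicate_succ]

lemma pv_repeat_succ' (l : List Char) (d : Nat) :
    PySem.List.pyRepeat l ((d : Int) + 1) = PySem.List.pyRepeat l (d : Int) ++ l := by
  simp [PySem.List.pyRepeat, show ((d : Int) + 1).toNat = d + 1 from by omega,
    List.replicate_succ']

lemma pv_peel_unfold (x : List Char) (d : Nat) :
    pvPeel x d = PySem.List.pyRepeat "array<".toList (d : Int)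
      ++ pvPeel (pvIter x d) 0 ++ PySem.List.pyRepeat ['>'] (d : Int) := by
  induction d generalizing x with
  | zero => simp [pvIter, PySem.List.pyRepeat]
  | succ k ih =>
    rw [show pvPeel x (k + 1)
        = "array<".toList ++ pvPeel (PySem.List.slice x (some 6) (some (-1))) k ++ ['>']
      from rfl]
    rw [ih]
    rw [show (((k : Nat) + 1 : Nat) : Int) = (k : Int) + 1 from by push_cast; ring]
    rw [pv_repeat_succ "array<".toList k, pv_repeat_succ' ['>'] k]
    rw [show pvIter x (k + 1) = pvIter (PySem.List.slice x (some 6) (some (-1))) k from rfl]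
    simp [List.append_assoc]

lemma pv_exists_concat3 (l : List Char) (h : 3 ≤ l.length) :
    ∃ ys a b c, l = ys ++ [a, b, c] := by
  rcases hl : l.reverse with _ | ⟨c, t1⟩
  · have h0 := congrArg List.length hl
    rw [List.length_reverse] at h0
    simp only [List.length_nil] at h0
    omega
  rcases t1 with _ | ⟨b, t2⟩
  · have h0 := congrArg List.length hl
    rw [List.length_reverse] at h0
    simp only [List.length_cons, List.length_nil] at h0
    omega
  rcases t2 with _ | ⟨a, t⟩
  · have h0 := congrArg List.length hl
    rw [List.length_reverse] at h0
    simp only [List.length_cons, List.length_nil] at h0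
    omega
  refine ⟨t.reverse, a, b, c, ?_⟩
  have := congrArg List.reverse hl
  simpa using this

lemma pv_pyIdx_neg (n : Nat) (k : Nat) (hk : 1 ≤ k) (h : k ≤ n + 3) (h3 : k ≤ 3) :
    PySem.List.pyIdx? (n + 3) (-(k : Int)) = some (n + 3 - k) := by
  simp only [PySem.List.pyIdx?]
  split_ifs with h1 h2 h3
  all_goals first | (congr 1; omega) | (exfalso; omega)

lemma pv_pyGet_neg3 (ys : List Char) (a b c : Char) :
    PySem.List.pyGet? (ys ++ [a, b, c]) (-3) = some a := by
  simp only [PySem.List.pyGet?]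
  rw [show (ys ++ [a, b, c]).length = ys.length + 3 from by simp]
  rw [show (-3 : Int) = -((3 : Nat) : Int) from by norm_num]
  rw [pv_pyIdx_neg ys.length 3 (by omega) (by omega) (by omega)]
  simp [List.getElem?_append_right]

lemma pv_pyGet_neg2 (ys : List Char) (a b c : Char) :
    PySem.List.pyGet? (ys ++ [a, b, c]) (-2) = some b := by
  simp only [PySem.List.pyGet?]
  rw [show (ys ++ [a, b, c]).length = ys.length + 3 from by simp]
  rw [show (-2 : Int) = -((2 : Nat) : Int) from by norm_num]
  rw [pv_pyIdx_neg ys.length 2 (by omega) (by omega) (by omega)]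
  rw [show ys.length + 3 - 2 = ys.length + 1 from by omega]
  simp [List.getElem?_append_right]

lemma pv_pyGet_neg1 (ys : List Char) (a b c : Char) :
    PySem.List.pyGet? (ys ++ [a, b, c]) (-1) = some c := by
  simp only [PySem.List.pyGet?]
  rw [show (ys ++ [a, b, c]).length = ys.length + 3 from by simp]
  rw [show (-1 : Int) = -((1 : Nat) : Int) from by norm_num]
  rw [pv_pyIdx_neg ys.length 1 (by omega) (by omega) (by omega)]
  rw [show ys.length + 3 - 1 = ys.length + 2 from by omega]
  simp [List.getElem?_append_right]

lemma pv_isIn_single (d : Char) (l : List Char) :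
    PySem.Chars.isIn [d] l = l.contains d := by
  rw [Bool.eq_iff_iff, PySem.Chars.isIn_iff_infix, List.singleton_infix_iff]
  simp

lemma pv_slice_from_neg3 (ys : List Char) (a b c : Char) :
    PySem.List.slice (ys ++ [a, b, c]) (some (-3)) none = [a, b, c] := by
  rw [PySem.List.slice_from_neg_ofNat _ 3 (by omega)]
  rw [show (ys ++ [a, b, c]).length - 3 = ys.length from by simp]
  simp

lemma pv_slice_from_neg1 (ys : List Char) (a b c : Char) :
    PySem.List.slice (ys ++ [a, b, c]) (some (-1)) none = [c] := by
  rw [PySem.List.slice_from_neg_one]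
  rw [show ys ++ [a, b, c] = (ys ++ [a, b]) ++ [c] from by simp]
  rw [show ((ys ++ [a, b]) ++ [c]).length - 1 = (ys ++ [a, b]).length from by simp]
  simp

lemma pv_mat_contains (ys : List Char) (a b c : Char) :
    pvMAT.contains (PySem.List.slice (ys ++ [a, b, c]) (some (-3)) none)
      = (PySem.Chars.isIn [a] ['2', '3', '4'] && PySem.Chars.isIn [c] ['2', '3', '4']
          && (b == 'x')) := by
  rw [pv_slice_from_neg3, pv_isIn_single, pv_isIn_single]
  simp only [pvMAT]
  rw [Bool.eq_iff_iff]
  simp only [List.contains_eq_mem, List.mem_cons, List.not_mem_nil, or_false,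
    Bool.and_eq_true, decide_eq_true_eq, beq_iff_eq]
  constructor
  · rintro (h | h | h | h | h | h | h | h | h) <;> simp_all
  · rintro ⟨⟨ha, hc⟩, rfl⟩
    rcases ha with rfl | rfl | rfl <;> rcases hc with rfl | rfl | rfl <;> simp

set_option maxHeartbeats 1000000 in
lemma pv_chars_eq (x : List Char) (h : pvCore x ≠ [':', ':']) :
    to_vec4_chars x = pvPeel x (PySem.Chars.count x ['>']) := by
  unfold to_vec4_chars
  simp only [PySem.List.pyRange_zero_natCast, List.foldl_map]
  rw [pv_loop_eq_iter, pv_iter_eq_core, pv_peel_unfold, pv_iter_eq_core]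
  by_cases hin : PySem.Chars.isIn [':', ':'] (pvCore x) = false
  · simp [pvPeel, hin, List.append_assoc]
  · have hin' : PySem.Chars.isIn [':', ':'] (pvCore x) = true := by
      revert hin; cases PySem.Chars.isIn [':', ':'] (pvCore x) <;> simp
    have hinf : [':', ':'] <:+: pvCore x := (PySem.Chars.isIn_iff_infix _ _).1 hin'
    have hlen2 : 2 ≤ (pvCore x).length := by
      have := hinf.sublist.length_le
      simpa using this
    have hlen3 : 3 ≤ (pvCore x).length := by
      rcases Nat.lt_or_ge (pvCore x).length 3 with hl | hl
      · exact absurd (hinf.sublist.eq_of_length (by simp; omega)).symm h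
      · exact hl
    obtain ⟨ys, a, b, c, hys⟩ := pv_exists_concat3 (pvCore x) hlen3
    rw [hys] at hin' ⊢
    rw [show pvPeel (ys ++ [a, b, c]) 0 = (if PySem.Chars.isIn [':', ':'] (ys ++ [a, b, c]) = false then
        "Math::".toList ++ (ys ++ [a, b, c]) ++ ['4']
      else
        (PySem.List.slice (ys ++ [a, b, c]) none (some (((ys ++ [a, b, c]).length : Int) -
          (if pvMAT.contains (PySem.List.slice (ys ++ [a, b, c]) (some (-3)) none) then 3
           else if PySem.Chars.isIn (PySem.List.slice (ys ++ [a, b, c]) (some (-1)) none)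
               ['2', '3', '4'] then 1
           else 0))) ++ ['4'])) from rfl]
    simp only [hin', show ((true = false) = False) from by simp, if_false]
    rw [pv_pyGet_neg3, pv_pyGet_neg1, pv_pyGet_neg2]
    simp only [Option.getD_some]
    rw [pv_mat_contains, pv_slice_from_neg1]
    simp only [pv_isIn_single]
    have hlen : (ys ++ [a, b, c]).length = ys.length + 3 := by simp
    by_cases h1 : (List.contains ['2', '3', '4'] a && List.contains ['2', '3', '4'] c
        && (b == 'x')) = true
    · rw [if_pos h1, if_pos h1]
      rw [PySem.List.slice_to_neg_ofNat _ 3 (by omega)]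
      rw [PySem.List.slice_to (ys ++ [a, b, c]) (b := ((ys ++ [a, b, c]).length : Int) - 3) (by omega)]
      rw [show (((ys ++ [a, b, c]).length : Int) - 3).toNat = (ys ++ [a, b, c]).length - 3 from by omega]
    · rw [if_neg h1, if_neg h1]
      by_cases h2 : (List.contains ['2', '3', '4'] c) = true
      · rw [if_pos h2, if_pos h2]
        rw [PySem.List.slice_to_neg_one]
        rw [PySem.List.slice_to (ys ++ [a, b, c]) (b := ((ys ++ [a, b, c]).length : Int) - 1) (by omega)]
        rw [show (((ys ++ [a, b, c]).length : Int) - 1).toNat = (ys ++ [a, b, c]).length - 1 from by omega]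
        rw [List.dropLast_eq_take]
      · rw [if_neg h2, if_neg h2]
        rw [PySem.List.slice_to (ys ++ [a, b, c]) (b := ((ys ++ [a, b, c]).length : Int) - 0) (by omega)]
        rw [show (((ys ++ [a, b, c]).length : Int) - 0).toNat = (ys ++ [a, b, c]).length from by omega]
        rw [List.take_length]

-- ===== VERDICT (by name: the statement is the Claim_ definition above) =====
theorem to_vec4_py_spec : Claim_equal_to_vec4_py := by
  intro x _ hpre
  unfold Spec_to_vec4_py to_vec4_py to_vec4_py_alt
  exact congrArg String.ofList (pv_chars_eq x.toList hpre)
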